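-- pv_equiv track=rewrite | github.com/Userphenixe/Personal_Projects | Python_Scripts/Scripts_Bootcamp/Enumerate_Function.py | odd_indexed_elements
-- ===== SOURCE A (Python) =====
-- def odd_indexed_elements(my_list):
--     # Initialize an empty list to store elements at odd indices
--     my_list_odd = []
--     dictio = {}
--
--     # Use enumerate to loop through my_list, with index and value for each element
--     for index, value in enumerate(my_list):
--         dictio[index] = value  # Store the value at its index as key in dictio
--
--     # Extract elements from odd indices and store them in my_list_odd
--     for key, value in dictio.items():
--         if int(key) % 2 != 0:
--             my_list_odd.append(value)
--
--     return my_list_odd  # Return list of elements at odd indices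
-- ===== SOURCE B (Python) =====
-- def odd_indexed_elements(my_list):
--     # Elements at odd indices, via a single stride slice.
--     return my_list[1::2]
-- ===== Notes on version B (the rewrite author's own statement) =====
-- stated objective: idiomatic
-- what changed: Replaced the dict-building loop plus filtering loop with a single stride slice my_list[1::2].
import Mathlib
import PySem

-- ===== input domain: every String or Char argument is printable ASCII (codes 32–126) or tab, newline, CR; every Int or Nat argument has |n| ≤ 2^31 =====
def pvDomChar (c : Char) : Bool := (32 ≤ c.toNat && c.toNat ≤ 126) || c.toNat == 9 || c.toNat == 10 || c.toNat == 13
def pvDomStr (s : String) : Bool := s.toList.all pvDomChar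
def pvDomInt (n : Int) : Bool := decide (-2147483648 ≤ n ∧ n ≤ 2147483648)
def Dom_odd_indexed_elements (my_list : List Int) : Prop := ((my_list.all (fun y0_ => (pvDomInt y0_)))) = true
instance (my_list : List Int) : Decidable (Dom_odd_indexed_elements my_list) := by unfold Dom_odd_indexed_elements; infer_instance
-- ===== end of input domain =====

-- B replaces A's dict-building loop and odd-key filter loop with a single stride slice my_list[1::2] (idiomatic).


-- ===== PORT A =====
-- literal port of A: build dictio[index] = value over enumerate(my_list), then
-- append values whose key is odd (int(key) is the identity on an int key)
def odd_indexed_elements (my_list : List Int) : List Int :=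
  let dictio : PySem.Dict Int Int :=
    (PySem.List.enumerate my_list 0).foldl (fun d p => d.insert p.1 p.2) PySem.Dict.empty
  dictio.items.foldl
    (fun my_list_odd p => if PySem.Int.mod p.1 2 ≠ 0 then my_list_odd ++ [p.2] else my_list_odd) []

-- ===== PORT B =====
-- literal port of B: return my_list[1::2]  (step 2 ≠ 0, so the slice never fails)
def odd_indexed_elements_alt (my_list : List Int) : List Int :=
  (PySem.List.slice? my_list (some 1) none 2).getD []

-- ===== PRECONDITION & SPEC =====
def Spec_odd_indexed_elements (my_list : List Int) (out : List Int) : Prop := out = odd_indexed_elements_alt my_list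
instance (my_list : List Int) (out : List Int) : Decidable (Spec_odd_indexed_elements my_list out) := by unfold Spec_odd_indexed_elements; infer_instance

-- ===== CLAIM (what is proved, stated in full; the proofs are below) =====
def Claim_equal_odd_indexed_elements : Prop := ∀ (my_list : List Int), Dom_odd_indexed_elements my_list → Spec_odd_indexed_elements my_list (odd_indexed_elements my_list)

-- ===== LEMMAS AND PROOFS =====

-- canonical description of both programs: every second element, starting at index 1
def oddRec : List Int → List Int
  | [] => []
  | [_] => []
  | _ :: b :: t => b :: oddRec t

-- A's second loop over (enumerate xs s), written as a pure selection
def sel : List Int → Int → List Int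
  | [], _ => []
  | x :: t, s => (if PySem.Int.mod s 2 ≠ 0 then [x] else []) ++ sel t (s + 1)

lemma foldl_enum_sel (xs : List Int) (s : Int) (acc : List Int) :
    (PySem.List.enumerate xs s).foldl
      (fun a p => if PySem.Int.mod p.1 2 ≠ 0 then a ++ [p.2] else a) acc
      = acc ++ sel xs s := by
  induction xs generalizing s acc with
  | nil => simp [sel, PySem.List.enumerate_nil]
  | cons x t ih =>
    rw [PySem.List.enumerate_cons]
    simp only [List.foldl_cons, ih, sel]
    split <;> simp

lemma sel_parity (t : List Int) (s s' : Int) (h : s % 2 = s' % 2) :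
    sel t s = sel t s' := by
  induction t generalizing s s' with
  | nil => rfl
  | cons x t ih =>
    simp only [sel, PySem.Int.mod_eq_emod_of_pos (by norm_num : (0:Int) < 2)]
    rw [h, ih (s + 1) (s' + 1) (by omega)]

lemma sel_zero_eq_oddRec (xs : List Int) : sel xs 0 = oddRec xs := by
  induction xs using oddRec.induct with
  | case1 => rfl
  | case2 a =>
    show (if PySem.Int.mod 0 2 ≠ 0 then [a] else []) ++ [] = []
    norm_num
  | case3 a b t ih =>
    simp only [sel, PySem.Int.mod_eq_emod_of_pos (by norm_num : (0:Int) < 2)]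
    norm_num
    rw [sel_parity t 2 0 (by norm_num)]
    simp [oddRec, ih]

lemma a_eq_oddRec (xs : List Int) : odd_indexed_elements xs = oddRec xs := by
  unfold odd_indexed_elements
  have hfresh : ∀ p ∈ PySem.List.enumerate xs 0,
      (PySem.Dict.empty : PySem.Dict Int Int).contains p.1 = false := by
    intro p _; simp [PySem.Dict.contains_empty]
  have hnodup : ((PySem.List.enumerate xs 0).map (·.1)).Nodup := by
    rw [PySem.List.map_fst_enumerate]
    exact PySem.List.nodup_pyRange_one 0 _
  have hitems :
      ((PySem.List.enumerate xs 0).foldl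
        (fun d p => d.insert p.1 p.2) PySem.Dict.empty).items
        = PySem.Dict.empty.items ++ (PySem.List.enumerate xs 0).map (fun p => (p.1, p.2)) :=
    PySem.Dict.items_foldl_insert_fresh _ _ _ _ hfresh hnodup
  simp only [hitems]
  have : (PySem.List.enumerate xs 0).map (fun p => (p.1, p.2)) = PySem.List.enumerate xs 0 := by
    simp
  rw [this]
  have hempty : (PySem.Dict.empty : PySem.Dict Int Int).items = [] := rfl
  rw [hempty, List.nil_append, foldl_enum_sel, List.nil_append, sel_zero_eq_oddRec]

lemma oddRec_eq_filterMap (xs : List Int) :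
    oddRec xs = (List.range (xs.length / 2)).filterMap (fun k => xs[2 * k + 1]?) := by
  induction xs using oddRec.induct with
  | case1 => rfl
  | case2 a => simp [oddRec]
  | case3 a b t ih =>
    have hlen : (a :: b :: t).length / 2 = t.length / 2 + 1 := by simp; omega
    rw [hlen, List.range_succ_eq_map]
    simp only [List.filterMap_cons, List.filterMap_map]
    have h0 : (a :: b :: t)[2 * 0 + 1]? = some b := rfl
    rw [h0]
    have hshift : ∀ k : ℕ, (a :: b :: t)[2 * (k + 1) + 1]? = t[2 * k + 1]? := by
      intro k
      have : 2 * (k + 1) + 1 = (2 * k + 1) + 2 := by omega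
      rw [this]; rfl
    have : (List.range (t.length / 2)).filterMap ((fun k => (a :: b :: t)[2 * k + 1]?) ∘ (fun k => k + 1))
        = (List.range (t.length / 2)).filterMap (fun k => t[2 * k + 1]?) := by
      apply List.filterMap_congr
      intro k _; exact hshift k
    simp only [Function.comp] at this ⊢
    rw [this, ← ih, oddRec]

lemma b_eq_oddRec (xs : List Int) : odd_indexed_elements_alt xs = oddRec xs := by
  unfold odd_indexed_elements_alt
  cases xs with
  | nil => rfl
  | cons a t =>
    rw [oddRec_eq_filterMap]
    simp only [PySem.List.slice?, PySem.List.sliceIndices]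
    norm_num
    have hcount : (if 0 < t.length then (((t.length : Int) + 2 - 1) / 2).toNat else 0)
        = (t.length + 1) / 2 := by
      split <;> omega
    rw [hcount]
    apply List.filterMap_congr
    intro k _
    have h1 : ((1 : Int) + 2 * (k : Int)).toNat = 2 * k + 1 := by omega
    rw [h1]
    simp

-- ===== VERDICT (by name: the statement is the Claim_ definition above) =====
theorem odd_indexed_elements_spec : Claim_equal_odd_indexed_elements := by
  intro my_list _
  unfold Spec_odd_indexed_elements
  rw [a_eq_oddRec, b_eq_oddRec]
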